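-- pv_equiv track=rewrite | github.com/ZiadAmerr/VeriLint | file.py | is_fsm
-- ===== SOURCE A (Python) =====
-- def is_fsm(my_file):
--     """Check whether the file has FSM states"""
--     current_state = False
--     next_state = False
--     for line in my_file:
--         line = line[1]
--         if "current_state" in line:
--             current_state = True
--         if "next_state" in line:
--             next_state = True
--         if current_state and next_state:
--             return True
--     return False
-- ===== SOURCE B (Python) =====
-- def is_fsm(my_file):
--     """Check whether the file has FSM states"""
--     lines = list(my_file)
--     return (any("current_state" in l[1] for l in lines)
--             and any("next_state" in l[1] for l in lines))
-- ===== Notes on version B (the rewrite author's own statement) =====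
-- stated objective: idiomatic
-- what changed: Replaces the fused single pass with two mutable flags and an early return by materializing the input and ANDing two independent any(...) substring scans.
import Mathlib
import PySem

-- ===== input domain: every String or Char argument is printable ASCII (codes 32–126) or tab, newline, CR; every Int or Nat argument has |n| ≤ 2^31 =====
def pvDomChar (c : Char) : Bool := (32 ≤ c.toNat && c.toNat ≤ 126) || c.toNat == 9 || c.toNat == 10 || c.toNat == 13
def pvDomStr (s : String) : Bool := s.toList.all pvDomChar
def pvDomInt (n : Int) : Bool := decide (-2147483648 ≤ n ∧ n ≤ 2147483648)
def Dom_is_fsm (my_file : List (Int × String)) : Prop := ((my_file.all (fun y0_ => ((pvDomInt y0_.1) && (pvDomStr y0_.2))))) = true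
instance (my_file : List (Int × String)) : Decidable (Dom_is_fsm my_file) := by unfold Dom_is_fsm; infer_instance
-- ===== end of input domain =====

-- B change: one fused pass with two flags and early exit in A is replaced in B by
-- two independent any-scans over the materialized list, ANDed (idiomatic; same cost).

-- ===== PORT A =====
-- the for-loop of A: state = (current_state, next_state), branches in source order
def is_fsm_loop (lines : List (Int × String)) (current_state next_state : Bool) : Bool :=
  match lines with
  | [] => false
  | line :: rest =>
    let l := line.2
    let current_state := if PySem.Str.isIn "current_state" l then true else current_state
    let next_state := if PySem.Str.isIn "next_state" l then true else next_state
    if current_state && next_state then true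
    else is_fsm_loop rest current_state next_state

def is_fsm (my_file : List (Int × String)) : Bool :=
  is_fsm_loop my_file false false

-- ===== PORT B =====
def is_fsm_alt (my_file : List (Int × String)) : Bool :=
  let lines := my_file
  (lines.any fun l => PySem.Str.isIn "current_state" l.2) &&
  (lines.any fun l => PySem.Str.isIn "next_state" l.2)

-- ===== PRECONDITION & SPEC =====
def Spec_is_fsm (my_file : List (Int × String)) (out : Bool) : Prop := out = is_fsm_alt my_file
instance (my_file : List (Int × String)) (out : Bool) : Decidable (Spec_is_fsm my_file out) := by unfold Spec_is_fsm; infer_instance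

-- ===== CLAIM (what is proved, stated in full; the proofs are below) =====
def Claim_equal_is_fsm : Prop := ∀ (my_file : List (Int × String)), Dom_is_fsm my_file → Spec_is_fsm my_file (is_fsm my_file)

-- ===== LEMMAS AND PROOFS =====
-- loop invariant: provided both flags are not yet set, the loop returns
-- (cs set-or-found) && (ns set-or-found)
theorem is_fsm_loop_eq (lines : List (Int × String)) (cs ns : Bool)
    (h : ¬ (cs = true ∧ ns = true)) :
    is_fsm_loop lines cs ns =
      ((cs || lines.any fun l => PySem.Str.isIn "current_state" l.2) &&
       (ns || lines.any fun l => PySem.Str.isIn "next_state" l.2)) := by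
  induction lines generalizing cs ns with
  | nil => cases cs <;> cases ns <;> simp_all [is_fsm_loop]
  | cons line rest ih =>
    simp only [is_fsm_loop, List.any_cons]
    by_cases hc : PySem.Str.isIn "current_state" line.2 = true <;>
      by_cases hn : PySem.Str.isIn "next_state" line.2 = true <;>
      cases cs <;> cases ns <;>
      simp_all [is_fsm_loop, ih, Bool.or_assoc]

-- ===== VERDICT (by name: the statement is the Claim_ definition above) =====
theorem is_fsm_spec : Claim_equal_is_fsm := by
  intro my_file _
  unfold Spec_is_fsm is_fsm is_fsm_alt
  rw [is_fsm_loop_eq _ _ _ (by simp)]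
  simp
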